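-- pv_equiv track=rewrite | github.com/git-for-ai/gitforai | src/gitforai/wiki/prompts.py | parse_topic_response
-- ===== SOURCE A (Python) =====
-- def parse_topic_response(text: str) -> tuple[str, str]:
--     """Parse a ``TITLE: ...\\nSUMMARY: ...`` response into (title, summary).
--
--     Tolerates leading/trailing whitespace and missing fields. Returns empty
--     strings for fields that can't be extracted, so callers can decide whether
--     to fall back to naive output.
--     """
--     title = ""
--     summary = ""
--     in_summary = False
--     summary_lines: list = []
--
--     for raw_line in text.splitlines():
--         line = raw_line.strip()
--         if line.upper().startswith("TITLE:"):
--             title = line.split(":", 1)[1].strip()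
--             in_summary = False
--             continue
--         if line.upper().startswith("SUMMARY:"):
--             summary_lines = [line.split(":", 1)[1].strip()]
--             in_summary = True
--             continue
--         if in_summary:
--             summary_lines.append(raw_line.rstrip())
--
--     if summary_lines:
--         summary = "\n".join(summary_lines).strip()
--
--     return title, summary
-- ===== SOURCE B (Python) =====
-- def parse_topic_response(text: str) -> tuple[str, str]:
--     lines = text.splitlines()
--     t_idx = None
--     s_idx = None
--     for i, raw in enumerate(lines):
--         u = raw.strip().upper()
--         if u.startswith("TITLE:"):
--             t_idx = i
--         elif u.startswith("SUMMARY:"):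
--             s_idx = i
--     title = ""
--     summary = ""
--     if t_idx is not None:
--         title = lines[t_idx].strip().split(":", 1)[1].strip()
--     if s_idx is not None:
--         parts = [lines[s_idx].strip().split(":", 1)[1].strip()]
--         for raw in lines[s_idx + 1:]:
--             u = raw.strip().upper()
--             if u.startswith("TITLE:") or u.startswith("SUMMARY:"):
--                 break
--             parts.append(raw.rstrip())
--         summary = "\n".join(parts).strip()
--     return title, summary
-- ===== Notes on version B (the rewrite author's own statement) =====
-- stated objective: alternative
-- what changed: A is a single stateful scan carrying an in_summary flag and a growing accumulator; B first locates the LAST TITLE/SUMMARY header indices in one pass over enumerated lines, then extracts the title by direct lookup and collects the summary only from the lines after the last SUMMARY header, breaking at the next header.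
import Mathlib
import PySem

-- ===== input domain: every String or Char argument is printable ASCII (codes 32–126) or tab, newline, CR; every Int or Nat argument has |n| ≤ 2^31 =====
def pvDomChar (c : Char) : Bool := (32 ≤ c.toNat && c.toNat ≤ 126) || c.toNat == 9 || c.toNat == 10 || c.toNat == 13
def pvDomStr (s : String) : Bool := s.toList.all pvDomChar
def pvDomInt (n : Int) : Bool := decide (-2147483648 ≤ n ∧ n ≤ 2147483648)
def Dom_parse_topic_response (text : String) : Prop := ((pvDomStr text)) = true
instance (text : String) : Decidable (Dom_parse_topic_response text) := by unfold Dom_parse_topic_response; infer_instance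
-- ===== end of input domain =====

-- B re-implements A by a different decomposition: find the LAST header indices in one pass,
-- then extract title/summary from those positions (objective: alternative; same cost).

-- ===== PORT A =====
-- line.split(":", 1)[1].strip(); evaluated only on lines starting (case-insensitively) with
-- "TITLE:"/"SUMMARY:", where a colon exists, so the "" fallback is unreachable
def pvAfterColon (line : String) : String :=
  match PySem.Str.splitMax? line ":" 1 with
  | some (_ :: rest :: _) => PySem.Str.strip rest
  | _ => ""

def parse_topic_response (text : String) : String × String :=
  let fin := (PySem.Str.splitlines text).foldl
    (fun (st : String × Bool × List String) raw =>
      let line := PySem.Str.strip raw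
      if PySem.Str.startswith (PySem.Str.upper line) "TITLE:" then
        (pvAfterColon line, false, st.2.2)
      else if PySem.Str.startswith (PySem.Str.upper line) "SUMMARY:" then
        (st.1, true, [pvAfterColon line])
      else if st.2.1 then (st.1, st.2.1, st.2.2 ++ [PySem.Str.rstrip raw])
      else st)
    ("", false, [])
  (fin.1, if fin.2.2.isEmpty then "" else PySem.Str.strip (PySem.Str.join "\n" fin.2.2))

-- ===== PORT B =====
-- the for-loop over lines[s_idx+1:] with break: collect rstripped lines up to the first header
def pvCollect : List String → List String
  | [] => []
  | raw :: rest =>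
    let u := PySem.Str.upper (PySem.Str.strip raw)
    if PySem.Str.startswith u "TITLE:" || PySem.Str.startswith u "SUMMARY:" then []
    else PySem.Str.rstrip raw :: pvCollect rest

def parse_topic_response_alt (text : String) : String × String :=
  let lines := PySem.Str.splitlines text
  let idx := (PySem.List.enumerate lines 0).foldl
    (fun (p : Option Int × Option Int) ir =>
      let u := PySem.Str.upper (PySem.Str.strip ir.2)
      if PySem.Str.startswith u "TITLE:" then (some ir.1, p.2)
      else if PySem.Str.startswith u "SUMMARY:" then (p.1, some ir.1)
      else p)
    (none, none)
  let title := match idx.1 with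
    | none => ""
    | some i => pvAfterColon (PySem.Str.strip ((PySem.List.pyGet? lines i).getD ""))
  let summary := match idx.2 with
    | none => ""
    | some j =>
      let parts := pvAfterColon (PySem.Str.strip ((PySem.List.pyGet? lines j).getD "")) ::
        pvCollect (PySem.List.slice lines (some (j + 1)) none)
      PySem.Str.strip (PySem.Str.join "\n" parts)
  (title, summary)

-- ===== PRECONDITION & SPEC =====
def Spec_parse_topic_response (text : String) (out : String × String) : Prop := out = parse_topic_response_alt text
instance (text : String) (out : String × String) : Decidable (Spec_parse_topic_response text out) := by unfold Spec_parse_topic_response; infer_instance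

-- ===== CLAIM (what is proved, stated in full; the proofs are below) =====
def Claim_equal_parse_topic_response : Prop := ∀ (text : String), Dom_parse_topic_response text → Spec_parse_topic_response text (parse_topic_response text)

-- ===== LEMMAS AND PROOFS =====

def pvIsT (r : String) : Bool := PySem.Str.startswith (PySem.Str.upper (PySem.Str.strip r)) "TITLE:"
def pvIsS (r : String) : Bool := PySem.Str.startswith (PySem.Str.upper (PySem.Str.strip r)) "SUMMARY:"
def pvC (r : String) : String := pvAfterColon (PySem.Str.strip r)

def pvAStep (st : String × Bool × List String) (raw : String) : String × Bool × List String :=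
  if pvIsT raw then (pvC raw, false, st.2.2)
  else if pvIsS raw then (st.1, true, [pvC raw])
  else if st.2.1 then (st.1, st.2.1, st.2.2 ++ [PySem.Str.rstrip raw])
  else st

def pvBStep (p : Option Int × Option Int) (ir : Int × String) : Option Int × Option Int :=
  if pvIsT ir.2 then (some ir.1, p.2)
  else if pvIsS ir.2 then (p.1, some ir.1)
  else p

lemma pvA_unfold (text : String) :
    parse_topic_response text =
      (let fin := (PySem.Str.splitlines text).foldl pvAStep ("", false, [])
       (fin.1, if fin.2.2.isEmpty then "" else PySem.Str.strip (PySem.Str.join "\n" fin.2.2))) := rfl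

lemma pvB_unfold (text : String) :
    parse_topic_response_alt text =
      (let lines := PySem.Str.splitlines text
       let idx := (PySem.List.enumerate lines 0).foldl pvBStep (none, none)
       ((match idx.1 with
         | none => ""
         | some i => pvC ((PySem.List.pyGet? lines i).getD "")),
        (match idx.2 with
         | none => ""
         | some j => PySem.Str.strip (PySem.Str.join "\n"
             (pvC ((PySem.List.pyGet? lines j).getD "") ::
              pvCollect (PySem.List.slice lines (some (j + 1)) none)))))) := rfl

lemma pvCollect_cons (x : String) (xs : List String) :
    pvCollect (x :: xs) =
      if pvIsT x || pvIsS x then [] else PySem.Str.rstrip x :: pvCollect xs := rfl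

lemma pvCollect_append_singleton (l : List String) (r : String) :
    pvCollect (l ++ [r]) =
      if l.any (fun x => pvIsT x || pvIsS x) then pvCollect l
      else pvCollect l ++ (if pvIsT r || pvIsS r then [] else [PySem.Str.rstrip r]) := by
  induction l with
  | nil =>
    rw [List.nil_append, pvCollect_cons]
    by_cases h : (pvIsT r || pvIsS r) = true <;>
      simp only [List.any_nil, Bool.false_eq_true, if_false, h, if_true] at * <;>
      simp [pvCollect]
  | cons x xs ih =>
    simp only [List.cons_append, pvCollect_cons, List.any_cons]
    by_cases hx : (pvIsT x || pvIsS x) = true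
    · simp [hx]
    · simp only [Bool.not_eq_true] at hx
      simp only [hx, Bool.false_or, Bool.false_eq_true, if_false, ih]
      split_ifs <;> rfl

lemma pvEnum_append (ls : List String) (r : String) :
    PySem.List.enumerate (ls ++ [r]) 0 =
      PySem.List.enumerate ls 0 ++ [((ls.length : Int), r)] := by
  simp [PySem.List.enumerate_append, PySem.List.enumerate_cons, PySem.List.enumerate_nil]

lemma pvInv (ls : List String) :
    (ls.foldl pvAStep ("", false, [])).1 =
      (match ((PySem.List.enumerate ls 0).foldl pvBStep (none, none)).1 with
       | none => ""
       | some i => pvC ((PySem.List.pyGet? ls i).getD "")) ∧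
    (((PySem.List.enumerate ls 0).foldl pvBStep (none, none)).1 = none ∨
      ∃ i : Nat, ((PySem.List.enumerate ls 0).foldl pvBStep (none, none)).1 = some (i : Int) ∧ i < ls.length) ∧
    (match ((PySem.List.enumerate ls 0).foldl pvBStep (none, none)).2 with
     | none => (ls.foldl pvAStep ("", false, [])).2.1 = false ∧ (ls.foldl pvAStep ("", false, [])).2.2 = []
     | some j => ∃ jn : Nat, j = (jn : Int) ∧ jn < ls.length ∧
         (ls.foldl pvAStep ("", false, [])).2.2 =
           pvC ((PySem.List.pyGet? ls j).getD "") :: pvCollect (ls.drop (jn + 1)) ∧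
         (ls.foldl pvAStep ("", false, [])).2.1 =
           !((ls.drop (jn + 1)).any (fun x => pvIsT x || pvIsS x))) := by
  induction ls using List.reverseRecOn with
  | nil => exact ⟨rfl, Or.inl rfl, rfl, rfl⟩
  | append_singleton ls r ih =>
    obtain ⟨iht, ihb, ihs⟩ := ih
    rw [pvEnum_append]
    rw [List.foldl_append, List.foldl_append]
    simp only [List.foldl_cons, List.foldl_nil]
    set a := ls.foldl pvAStep ("", false, []) with ha
    set b := (PySem.List.enumerate ls 0).foldl pvBStep (none, none) with hb
    have hget_last : PySem.List.pyGet? (ls ++ [r]) ((ls.length : Int)) = some r := by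
      exact PySem.List.pyGet?_append_length ls [] r
    have hget_stable : ∀ i : Nat, i < ls.length →
        PySem.List.pyGet? (ls ++ [r]) ((i : Int)) = PySem.List.pyGet? ls ((i : Int)) := by
      intro i hi
      simp [PySem.List.pyGet?_natCast, List.getElem?_append_left hi]
    have hdrop_stable : ∀ jn : Nat, jn < ls.length →
        (ls ++ [r]).drop (jn + 1) = ls.drop (jn + 1) ++ [r] := by
      intro jn hjn
      exact List.drop_append_of_le_length (by omega)
    have hdrop_last : (ls ++ [r]).drop (ls.length + 1) = [] := by
      apply List.drop_eq_nil_of_le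
      simp
    by_cases hT : pvIsT r = true
    · -- TITLE line appended
      simp only [pvAStep, pvBStep, hT, if_true]
      refine ⟨?_, ?_, ?_⟩
      · rw [hget_last]; rfl
      · exact Or.inr ⟨ls.length, rfl, by simp⟩
      · cases hb2 : b.2 with
        | none =>
          rw [hb2] at ihs
          exact ⟨by trivial, ihs.2⟩
        | some j =>
          rw [hb2] at ihs
          obtain ⟨jn, hj, hjn, hacc, hins⟩ := ihs
          refine ⟨jn, hj, by simp; omega, ?_, ?_⟩
          · rw [hj, hget_stable jn hjn, ← hj, hdrop_stable jn hjn,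
              pvCollect_append_singleton]
            rw [hacc]
            simp only [hT, Bool.true_or, if_true, List.append_nil]
            split_ifs <;> rfl
          · rw [hdrop_stable jn hjn]
            simp [hT]
    · by_cases hS : pvIsS r = true
      · -- SUMMARY line appended
        simp only [pvAStep, pvBStep, hT, hS, Bool.false_eq_true, if_false, if_true]
        refine ⟨?_, ?_, ?_⟩
        · cases hb1 : b.1 with
          | none => rw [hb1] at iht; exact iht
          | some i =>
            rw [hb1] at iht ihb
            rcases ihb with h | ⟨i', hi', hlt⟩
            · exact absurd h (by simp)
            · rw [Option.some_inj] at hi'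
              subst hi'
              show _ = pvC ((PySem.List.pyGet? (ls ++ [r]) ((i' : Int))).getD "")
              rw [hget_stable i' hlt]
              exact iht
        · rcases ihb with h | ⟨i, hi, hlt⟩
          · exact Or.inl h
          · exact Or.inr ⟨i, hi, by simp; omega⟩
        · refine ⟨ls.length, rfl, by simp, ?_, ?_⟩
          · rw [hget_last, hdrop_last]
            rfl
          · rw [hdrop_last]
            rfl
      · -- plain line appended
        simp only [pvAStep, pvBStep, hT, hS, Bool.false_eq_true, if_false]
        have htitle : (if a.2.1 = true then (a.1, a.2.1, a.2.2 ++ [PySem.Str.rstrip r]) else a).1 = a.1 := by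
          split_ifs <;> rfl
        refine ⟨?_, ?_, ?_⟩
        · rw [htitle]
          cases hb1 : b.1 with
          | none => rw [hb1] at iht; exact iht
          | some i =>
            rw [hb1] at iht ihb
            rcases ihb with h | ⟨i', hi', hlt⟩
            · exact absurd h (by simp)
            · rw [Option.some_inj] at hi'
              subst hi'
              show _ = pvC ((PySem.List.pyGet? (ls ++ [r]) ((i' : Int))).getD "")
              rw [hget_stable i' hlt]
              exact iht
        · rcases ihb with h | ⟨i, hi, hlt⟩
          · exact Or.inl h
          · exact Or.inr ⟨i, hi, by simp; omega⟩
        · cases hb2 : b.2 with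
          | none =>
            rw [hb2] at ihs
            rw [if_neg (by rw [ihs.1]; simp)]
            exact ihs
          | some j =>
            rw [hb2] at ihs
            obtain ⟨jn, hj, hjn, hacc, hins⟩ := ihs
            have hT' : pvIsT r = false := by simpa using hT
            have hS' : pvIsS r = false := by simpa using hS
            refine ⟨jn, hj, by simp; omega, ?_, ?_⟩
            · rw [hj, hget_stable jn hjn, ← hj, hdrop_stable jn hjn,
                pvCollect_append_singleton]
              by_cases hany : (ls.drop (jn + 1)).any (fun x => pvIsT x || pvIsS x) = true
              · have h21 : a.2.1 = false := by rw [hins, hany]; rfl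
                simp only [h21, Bool.false_eq_true, if_false, hany, if_true]
                exact hacc
              · have hany' : (ls.drop (jn + 1)).any (fun x => pvIsT x || pvIsS x) = false := by
                  simpa using hany
                have h21 : a.2.1 = true := by rw [hins, hany']; rfl
                simp only [h21, if_true, hany', Bool.false_eq_true, if_false, hT', hS',
                  Bool.or_self, hacc, List.cons_append]
            · rw [hdrop_stable jn hjn]
              have hproj : (if a.2.1 = true then (a.1, a.2.1, a.2.2 ++ [PySem.Str.rstrip r])
                  else a).2.1 = a.2.1 := by split_ifs <;> rfl
              rw [hproj, hins]
              simp [hT', hS']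

-- ===== VERDICT (by name: the statement is the Claim_ definition above) =====
theorem parse_topic_response_spec : Claim_equal_parse_topic_response := by
  intro text _
  unfold Spec_parse_topic_response
  rw [pvA_unfold, pvB_unfold]
  obtain ⟨h1, h2, h3⟩ := pvInv (PySem.Str.splitlines text)
  set ls := PySem.Str.splitlines text with hls
  set a := ls.foldl pvAStep ("", false, []) with ha
  set b := (PySem.List.enumerate ls 0).foldl pvBStep (none, none) with hb
  dsimp only
  refine Prod.ext h1 ?_
  cases hb2 : b.2 with
  | none =>
    rw [hb2] at h3
    rw [h3.2]
    rfl
  | some j =>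
    rw [hb2] at h3
    obtain ⟨jn, hj, hjn, hacc, _⟩ := h3
    rw [hacc]
    have hslice : PySem.List.slice ls (some ((jn : Int) + 1)) none = ls.drop (jn + 1) := by
      rw [PySem.List.slice_from ls (show (0 : Int) ≤ (jn : Int) + 1 by omega)]
      congr 1
    subst hj
    dsimp only
    rw [hslice]
    rfl
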